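-- pv_equiv track=rewrite | github.com/looking-for-my-magic-bean/leetcode | old/网易/wangyi3.py | solution
-- ===== SOURCE A (Python) =====
-- import collections
--
-- def solution(n, k, ss):
--     result = 0
--     for i in range(n-1):
--         if i == 0:
--             for j in range(i+1, n-1):
--                 temp_s = ss[:i]+ss[j+1:n+1]
--                 # 对出现的字符串排序后还要加.most_common(2)将字典按照字母出现频率排序成列表，形式[("s",3),("a", 2)]
--                 temp = collections.Counter(temp_s).most_common(2)
--                 c = temp[0][1]
--                 if c <= k:
--                     result += 1
--         else:
--             for j in range(i+1, n):
--                 temp_s = ss[:i]+ss[j+1:n+1]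
--                 temp = collections.Counter(temp_s).most_common(2)
--                 c = temp[0][1]
--                 if c <= k:
--                     result += 1
--
--     return result
-- ===== SOURCE B (Python) =====
-- # B: per-character prefix counts, computed once; each pair is tested by arithmetic
-- # on them instead of building a substring and a Counter per pair.
-- def _prefix(used, c):
--     out = [0]
--     t = 0
--     for ch in used:
--         if ch == c:
--             t += 1
--         out.append(t)
--     return out
--
-- def solution(n, k, ss):
--     end = min(n + 1, len(ss))
--     used = ss[:end]
--     # only characters whose total count already exceeds k can ever violate
--     # "every count <= k" in a trimmed string; the rest need not be checked
--     chars = sorted(c for c in set(used) if used.count(c) > k)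
--     pre = [(c, _prefix(used, c)) for c in chars]
--     result = 0
--     for i in range(n - 1):
--         hi = n - 1 if i == 0 else n
--         for j in range(i + 1, hi):
--             if all(pc[i] + pc[end] - pc[j + 1] <= k for c, pc in pre):
--                 result += 1
--     return result
-- ===== Notes on version B (the rewrite author's own statement) =====
-- stated objective: alternative
-- what changed: B precomputes per-character prefix-count arrays once and tests each (i,j) pair with per-alphabet arithmetic ('every relevant count <= k'), instead of A's building the trimmed string, a Counter and a sorted most_common list for every pair.
import Mathlib
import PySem

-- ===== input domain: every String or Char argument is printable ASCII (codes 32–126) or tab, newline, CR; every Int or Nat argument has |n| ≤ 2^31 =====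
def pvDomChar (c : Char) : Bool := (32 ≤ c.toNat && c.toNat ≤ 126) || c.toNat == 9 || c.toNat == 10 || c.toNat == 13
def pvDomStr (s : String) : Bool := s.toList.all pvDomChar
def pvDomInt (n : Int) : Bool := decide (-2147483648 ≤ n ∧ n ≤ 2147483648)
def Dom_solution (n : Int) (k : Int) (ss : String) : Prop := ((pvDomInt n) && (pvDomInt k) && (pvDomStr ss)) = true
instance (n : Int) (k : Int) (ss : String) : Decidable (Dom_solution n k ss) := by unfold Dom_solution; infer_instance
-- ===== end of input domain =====

-- B precomputes per-character prefix counts once and tests each (i,j) pair by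
-- arithmetic on them, instead of building a substring + Counter + sort per pair.

-- ===== PORT A =====
-- Counter(t).most_common(2) = first 2 items sorted by count descending (stable);
-- temp[0] raises IndexError when temp is empty — those inputs are excluded by Pre_.
def solution (n : Int) (k : Int) (ss : String) : Int :=
  let tl := ss.toList
  (PySem.List.pyRange 0 (n - 1) 1).foldl (fun result i =>
    if i == 0 then
      (PySem.List.pyRange (i + 1) (n - 1) 1).foldl (fun result j =>
        let temp_s := PySem.List.slice tl none (some i) ++
                      PySem.List.slice tl (some (j + 1)) (some (n + 1))
        let temp := (PySem.List.sorted (PySem.Dict.counter temp_s).items (fun p => p.2) true).take 2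
        let c := (PySem.List.pyGetD temp 0 (' ', 0)).2
        if c ≤ k then result + 1 else result) result
    else
      (PySem.List.pyRange (i + 1) n 1).foldl (fun result j =>
        let temp_s := PySem.List.slice tl none (some i) ++
                      PySem.List.slice tl (some (j + 1)) (some (n + 1))
        let temp := (PySem.List.sorted (PySem.Dict.counter temp_s).items (fun p => p.2) true).take 2
        let c := (PySem.List.pyGetD temp 0 (' ', 0)).2
        if c ≤ k then result + 1 else result) result) 0

-- ===== PORT B =====
-- _prefix(used, c): running count of c, appended after each character.
def prefixList (used : List Char) (c : Char) : List Int :=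
  (used.foldl (fun (st : List Int × Int) ch =>
    let t := if ch == c then st.2 + 1 else st.2
    (st.1 ++ [t], t)) ([(0 : Int)], (0 : Int))).1

-- pc[i] is in range whenever Pre_ holds; the default 0 is never used then.
def solution_alt (n : Int) (k : Int) (ss : String) : Int :=
  let endI := min (n + 1) (PySem.Str.len ss)
  let used := PySem.List.slice ss.toList none (some endI)
  let chars := PySem.List.sorted
    ((PySem.Set.ofList used).filter (fun c => decide ((used.count c : Int) > k))) (fun c => c) false
  let pre := chars.map (fun c => (c, prefixList used c))
  (PySem.List.pyRange 0 (n - 1) 1).foldl (fun result i =>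
    let hi := if i == 0 then n - 1 else n
    (PySem.List.pyRange (i + 1) hi 1).foldl (fun result j =>
      if pre.all (fun p => decide (PySem.List.pyGetD p.2 i 0 + PySem.List.pyGetD p.2 endI 0
                                   - PySem.List.pyGetD p.2 (j + 1) 0 ≤ k))
      then result + 1 else result) result) 0

-- ===== PRECONDITION & SPEC =====
-- Pre_ excludes exactly the inputs where A raises IndexError (n ≥ 3 with a string
-- shorter than n makes some trimmed string empty, so temp[0] fails).
def Pre_solution (n : Int) (k : Int) (ss : String) : Prop := n ≤ 2 ∨ n ≤ (ss.length : Int)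
instance (n : Int) (k : Int) (ss : String) : Decidable (Pre_solution n k ss) := by
  unfold Pre_solution; infer_instance

def pvWitness_solution : Int × Int × String := (3, 1, "abc")

def Spec_solution (n : Int) (k : Int) (ss : String) (out : Int) : Prop := out = solution_alt n k ss
instance (n : Int) (k : Int) (ss : String) (out : Int) : Decidable (Spec_solution n k ss out) := by
  unfold Spec_solution; infer_instance

-- ===== CLAIM (what is proved, stated in full; the proofs are below) =====
def Claim_equal_solution : Prop := ∀ (n : Int) (k : Int) (ss : String),
  Dom_solution n k ss → Pre_solution n k ss → Spec_solution n k ss (solution n k ss)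

-- ===== LEMMAS AND PROOFS =====

theorem prefixList_aux (c : Char) : ∀ (us : List Char) (acc : List Int) (t : Int),
    (us.foldl (fun (st : List Int × Int) ch =>
      let t := if ch == c then st.2 + 1 else st.2
      (st.1 ++ [t], t)) (acc, t)).1
    = acc ++ (List.range us.length).map (fun q => t + ((us.take (q + 1)).count c : Int)) := by
  intro us
  induction us with
  | nil => simp
  | cons ch us ih =>
    intro acc t
    simp only [List.foldl_cons]
    rw [ih]
    by_cases h : ch == c <;>
      simp [h, List.range_succ_eq_map, List.take_succ_cons, List.count_cons, List.map_map,
        Function.comp]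
    all_goals intro a _; ring

theorem prefixList_eq (used : List Char) (c : Char) :
    prefixList used c = (0 : Int) :: (List.range used.length).map
      (fun q => (((used.take (q + 1)).count c : Nat) : Int)) := by
  unfold prefixList
  rw [prefixList_aux]
  simp

theorem prefixList_getD (used : List Char) (c : Char) (p : Nat) (hp : p ≤ used.length) :
    PySem.List.pyGetD (prefixList used c) ((p : Nat) : Int) 0 = (((used.take p).count c : Nat) : Int) := by
  rw [PySem.List.pyGetD_natCast, prefixList_eq]
  cases p with
  | zero => simp
  | succ q =>
    have hq : q < used.length := by omega
    simp [List.getD, hq]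

theorem pair_cond (tl : List Char) (n k i j : Int)
    (hn : n ≤ (tl.length : Int))
    (hi0 : 0 ≤ i) (hij : i + 1 ≤ j) (hjn : j < n) (hcase : i = 0 → j < n - 1) :
    ((PySem.List.pyGetD ((PySem.List.sorted
        (PySem.Dict.counter (PySem.List.slice tl none (some i) ++
          PySem.List.slice tl (some (j + 1)) (some (n + 1)))).items
        (fun p => p.2) true).take 2) 0 (' ', 0)).2 ≤ k)
    ↔ (((PySem.List.sorted ((PySem.Set.ofList (PySem.List.slice tl none (some (min (n + 1) (tl.length : Int))))).filter
            (fun c => decide (((PySem.List.slice tl none (some (min (n + 1) (tl.length : Int)))).count c : Int) > k)))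
          (fun c => c) false).map
          (fun c => (c, prefixList (PySem.List.slice tl none (some (min (n + 1) (tl.length : Int)))) c))).all
        (fun p => decide (PySem.List.pyGetD p.2 i 0
          + PySem.List.pyGetD p.2 (min (n + 1) (tl.length : Int)) 0
          - PySem.List.pyGetD p.2 (j + 1) 0 ≤ k)) = true) := by
  -- basic arithmetic facts
  have hn3 : 3 ≤ n := by
    rcases eq_or_lt_of_le hi0 with h0 | h0
    · have := hcase h0.symm; omega
    · omega
  have hm : (3 : Int) ≤ (tl.length : Int) := le_trans hn3 hn
  set m : Nat := tl.length with hmdef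
  set endI : Int := min (n + 1) (m : Int) with hendI
  have hendI0 : 0 ≤ endI := by omega
  set endN : Nat := endI.toNat with hendN
  have hendNm : endN ≤ m := by omega
  have hendNn : n ≤ (endN : Int) := by omega
  set used : List Char := PySem.List.slice tl none (some endI) with hused
  have husedtake : used = tl.take endN := PySem.List.slice_to tl hendI0
  have hlenused : used.length = endN := by
    rw [husedtake, List.length_take]; omega
  set i' : Nat := i.toNat with hi'
  set j1 : Nat := (j + 1).toNat with hj1
  have hiI : i = (i' : Int) := by omega
  have hjI : j + 1 = (j1 : Int) := by omega
  have hi'e : i' + 2 ≤ endN := by omega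
  have hj1e : j1 ≤ endN := by omega
  -- temp_s in terms of used
  set temp_s : List Char := PySem.List.slice tl none (some i) ++
      PySem.List.slice tl (some (j + 1)) (some (n + 1)) with htemp
  have htemp_eq : temp_s = used.take i' ++ used.drop j1 := by
    rw [htemp, PySem.List.slice_to tl hi0, PySem.List.slice_toNat tl (by omega) (by omega),
      husedtake, List.take_take, List.drop_take]
    congr 1
    · congr 1; omega
    · rw [List.take_eq_take_iff]; simp [List.length_drop]; omega
  -- counts of temp_s via prefix counts
  have hcount : ∀ c : Char, ((temp_s.count c : Nat) : Int)
      = ((used.take i').count c : Nat) + ((used.count c : Nat) : Int) - ((used.take j1).count c : Nat) := by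
    intro c
    have hsplit : (used.take j1).count c + (used.drop j1).count c = used.count c := by
      rw [← List.count_append, List.take_append_drop]
    rw [htemp_eq, List.count_append]
    push_cast
    omega
  -- temp_s is nonempty
  have hne : temp_s ≠ [] := by
    rw [htemp_eq]
    rcases eq_or_lt_of_le hi0 with h0 | h0
    · have hj' := hcase h0.symm
      have : (used.drop j1).length ≠ 0 := by
        rw [List.length_drop, hlenused]; omega
      simp only [ne_eq, List.append_eq_nil_iff, not_and]
      intro _ hd; rw [hd] at this; simp at this
    · have : (used.take i').length ≠ 0 := by
        rw [List.length_take, hlenused]; omega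
      simp only [ne_eq, List.append_eq_nil_iff, not_and']
      intro _ ht; rw [ht] at this; simp at this
  -- every char of temp_s is a char of used
  have hsub : ∀ c : Char, c ∈ temp_s → c ∈ used := by
    intro c hc
    rw [htemp_eq] at hc
    rcases List.mem_append.mp hc with h | h
    · exact List.mem_of_mem_take h
    · exact List.mem_of_mem_drop h
  -- B side ↔ all chars of used have count ≤ k in temp_s
  have hmono : ∀ c : Char, (used.take i').count c ≤ (used.take j1).count c := by
    intro c
    have h1 : used.take i' = (used.take j1).take i' := by
      rw [List.take_take]; congr 1; omega
    rw [h1]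
    exact List.Sublist.count_le c (List.take_sublist ..)
  have hB : ((((PySem.List.sorted ((PySem.Set.ofList used).filter
            (fun c => decide ((used.count c : Int) > k))) (fun c => c) false).map
          (fun c => (c, prefixList used c))).all
        (fun p => decide (PySem.List.pyGetD p.2 i 0
          + PySem.List.pyGetD p.2 endI 0
          - PySem.List.pyGetD p.2 (j + 1) 0 ≤ k)) = true)
      ↔ (∀ c : Char, c ∈ used → ((temp_s.count c : Nat) : Int) ≤ k)) := by
    rw [List.all_eq_true]
    constructor
    · intro h c hc
      by_cases hbig : (used.count c : Int) > k
      case neg =>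
        have := hmono c
        have hle : temp_s.count c ≤ used.count c := by
          have h2 := hcount c; omega
        omega
      have hc' : c ∈ PySem.List.sorted ((PySem.Set.ofList used).filter
          (fun c => decide ((used.count c : Int) > k))) (fun c => c) false := by
        rw [PySem.List.mem_sorted, List.mem_filter, PySem.Set.mem_ofList]
        exact ⟨hc, decide_eq_true hbig⟩
      have := h (c, prefixList used c) (List.mem_map_of_mem hc')
      rw [decide_eq_true_iff] at this
      rw [hcount c]
      rw [hiI, hjI, show endI = ((endN : Nat) : Int) by omega] at this
      rw [prefixList_getD used c i' (by omega), prefixList_getD used c j1 (by omega),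
        prefixList_getD used c endN (by omega)] at this
      have he : (used.take endN).count c = used.count c := by
        rw [List.take_of_length_le (by omega)]
      omega
    · intro h p hp
      obtain ⟨c, hc, rfl⟩ := List.mem_map.mp hp
      rw [PySem.List.mem_sorted, List.mem_filter, PySem.Set.mem_ofList] at hc
      obtain ⟨hc, -⟩ := hc
      have := h c hc
      rw [hcount c] at this
      rw [decide_eq_true_iff]
      rw [hiI, hjI, show endI = ((endN : Nat) : Int) by omega]
      rw [prefixList_getD used c i' (by omega), prefixList_getD used c j1 (by omega),
        prefixList_getD used c endN (by omega)]
      have he : (used.take endN).count c = used.count c := by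
        rw [List.take_of_length_le (by omega)]
      omega
  -- A side ↔ all chars of used have count ≤ k in temp_s
  have hitems : (PySem.Dict.counter temp_s).items
      = (PySem.Set.ofList temp_s).map (fun c => (c, ((temp_s.count c : Nat) : Int))) :=
    PySem.Dict.items_counter temp_s
  obtain ⟨mhd, mtl, hsort⟩ : ∃ mhd mtl,
      PySem.List.sorted (PySem.Dict.counter temp_s).items (fun p => p.2) true = mhd :: mtl := by
    cases hs : PySem.List.sorted (PySem.Dict.counter temp_s).items (fun p => p.2) true with
    | nil =>
      exfalso
      rw [PySem.List.sorted_eq_nil_iff, hitems, List.map_eq_nil_iff] at hs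
      obtain ⟨c0, ts, hts⟩ := List.exists_cons_of_ne_nil hne
      have : c0 ∈ PySem.Set.ofList temp_s := by
        rw [PySem.Set.mem_ofList, hts]; exact List.mem_cons_self ..
      rw [hs] at this; simp at this
    | cons a l => exact ⟨a, l, rfl⟩
  have hmax := PySem.List.key_head_sorted_rev_ge _ _ hsort
  have hmem : mhd ∈ (PySem.Dict.counter temp_s).items := by
    rw [← PySem.List.mem_sorted (key := fun p => p.2) (rev := true), hsort]
    exact List.mem_cons_self ..
  obtain ⟨c0, hc0set, hc0eq⟩ := List.mem_map.mp (hitems ▸ hmem)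
  have hc0 : c0 ∈ temp_s := (PySem.Set.mem_ofList _ _).mp hc0set
  have hA : ((PySem.List.pyGetD ((PySem.List.sorted
        (PySem.Dict.counter temp_s).items (fun p => p.2) true).take 2) 0 (' ', 0)).2 ≤ k)
      ↔ (∀ c : Char, c ∈ used → ((temp_s.count c : Nat) : Int) ≤ k) := by
    rw [hsort]
    have h0 : PySem.List.pyGetD ((mhd :: mtl).take 2) 0 (' ', 0) = mhd := by
      rw [List.take_succ_cons, PySem.List.pyGetD_zero_cons]
    rw [h0]
    constructor
    · intro h c hc
      by_cases hct : c ∈ temp_s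
      · have h1 : (c, ((temp_s.count c : Nat) : Int)) ∈ (PySem.Dict.counter temp_s).items := by
          rw [hitems]
          exact List.mem_map_of_mem ((PySem.Set.mem_ofList _ _).mpr hct)
        exact le_trans (hmax _ h1) h
      · have hz : temp_s.count c = 0 := List.count_eq_zero.mpr hct
        have hpos : 0 < temp_s.count c0 := List.count_pos_iff.mpr hc0
        have hm2 : mhd.2 = ((temp_s.count c0 : Nat) : Int) := by rw [← hc0eq]
        omega
    · intro h
      have hm2 : mhd.2 = ((temp_s.count c0 : Nat) : Int) := by rw [← hc0eq]
      rw [hm2]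
      exact h c0 (hsub c0 hc0)
  exact hA.trans hB.symm

-- ===== VERDICT (by name: the statement is the Claim_ definition above) =====
theorem solution_spec : Claim_equal_solution := by
  intro n k ss _ hpre
  unfold Spec_solution solution solution_alt
  dsimp only
  apply PySem.List.foldl_congr_mem
  intro acc i hi
  rw [PySem.List.mem_pyRange_one] at hi
  have hn3 : (3 : Int) ≤ n → n ≤ (ss.toList.length : Int) := by
    intro h3
    rcases hpre with h | h
    · omega
    · simpa using h
  have hlen : PySem.Str.len ss = (ss.toList.length : Int) := by simp
  rw [hlen]
  by_cases h0 : i = 0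
  · simp only [h0, BEq.rfl, if_true]
    apply PySem.List.foldl_congr_mem
    intro acc' j hj
    rw [PySem.List.mem_pyRange_one] at hj
    have hn : n ≤ (ss.toList.length : Int) := hn3 (by omega)
    have hiff := pair_cond ss.toList n k 0 j hn (le_refl 0) (by omega) (by omega) (fun _ => by omega)
    simp only [hiff]
  · have hne : (i == 0) = false := by simp [h0]
    simp only [hne, Bool.false_eq_true, if_false]
    apply PySem.List.foldl_congr_mem
    intro acc' j hj
    rw [PySem.List.mem_pyRange_one] at hj
    have hn : n ≤ (ss.toList.length : Int) := hn3 (by omega)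
    have hiff := pair_cond ss.toList n k i j hn (by omega) (by omega) (by omega) (fun h => absurd h h0)
    simp only [hiff]
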